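-- pv_equiv track=rewrite | github.com/Pas-Kapli/phylophysalia2023 | first-day/filtering.py | remove_columns_with_missing_data
-- ===== SOURCE A (Python) =====
-- def remove_columns_with_missing_data(sequences):
--     """Remove columns with all missing data."""
--     seq_length = len(sequences[0])
--     valid_columns = [
--         i
--         for i in range(seq_length)
--         if any(seq[i] not in "-N" for seq in sequences)
--     ]
--     filtered_seqs = ["".join(seq[i] for i in valid_columns) for seq in sequences]
--     return filtered_seqs
-- ===== SOURCE B (Python) =====
-- def remove_columns_with_missing_data(sequences):
--     """Remove columns with all missing data."""
--     keep = [False] * len(sequences[0])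
--     for seq in sequences:
--         keep = [k or (c != '-' and c != 'N') for k, c in zip(keep, seq)]
--     return [''.join(c for c, k in zip(seq, keep) if k) for seq in sequences]
-- ===== Notes on version B (the rewrite author's own statement) =====
-- stated objective: alternative
-- what changed: B makes one row-wise pass that folds the rows into a boolean keep-mask (OR-ing per position), then compresses each row against that mask, replacing A's column-index loop whose inner any() rescans all rows per column.
-- outside the precondition, e.g. on remove_columns_with_missing_data(['AC', 'A']): A raises IndexError, B returns ['A', 'A']; on remove_columns_with_missing_data([]): A raises IndexError, B raises IndexError
import Mathlib
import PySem

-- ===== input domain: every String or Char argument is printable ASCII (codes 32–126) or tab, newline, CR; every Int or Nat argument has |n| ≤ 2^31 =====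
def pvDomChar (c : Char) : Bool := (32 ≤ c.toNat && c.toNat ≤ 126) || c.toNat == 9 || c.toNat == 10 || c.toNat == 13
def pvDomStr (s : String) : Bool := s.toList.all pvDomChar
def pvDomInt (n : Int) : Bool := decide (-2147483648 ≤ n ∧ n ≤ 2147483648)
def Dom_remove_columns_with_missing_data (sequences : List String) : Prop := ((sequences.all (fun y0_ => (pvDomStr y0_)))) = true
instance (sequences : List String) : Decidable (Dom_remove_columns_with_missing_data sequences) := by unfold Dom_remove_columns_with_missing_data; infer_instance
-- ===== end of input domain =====

-- B folds the rows once into a boolean keep-mask and compresses each row against it,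
-- instead of A's column-index loop with an inner any() over all rows per column.


-- ===== PORT A =====
-- A: collect the valid column indices of range(len(sequences[0])), then join seq[i]
-- over those indices for every row.  Indexing is exact on Pre_ (all indices in range);
-- outside Pre_ the Python raises IndexError and nothing is claimed.
def remove_columns_with_missing_data (sequences : List String) : List String :=
  match sequences with
  | [] => []  -- Python: sequences[0] raises IndexError; excluded by Pre_
  | s0 :: _ =>
    let seqLength := s0.toList.length
    let validColumns := (List.range seqLength).filter (fun i =>
      sequences.any (fun s =>
        !((s.toList.getD i ' ') == '-' || (s.toList.getD i ' ') == 'N')))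
    sequences.map (fun s => String.ofList (validColumns.map (fun i => s.toList.getD i ' ')))

-- ===== PORT B =====
-- B: keep = [False]*len(sequences[0]); fold every row into the mask with zip
-- (Python's zip truncates to the shorter list, exactly List.zip); then each row is
-- rebuilt as the characters whose mask bit is set (zip again).
def remove_columns_with_missing_data_alt (sequences : List String) : List String :=
  match sequences with
  | [] => []  -- Python: len(sequences[0]) raises IndexError; excluded by Pre_
  | s0 :: _ =>
    let keep0 : List Bool := List.replicate s0.toList.length false
    let keep := sequences.foldl
      (fun k s => (k.zip s.toList).map (fun p => p.1 || (p.2 != '-' && p.2 != 'N'))) keep0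
    sequences.map (fun s =>
      String.ofList (((s.toList.zip keep).filter (fun p => p.2)).map (fun p => p.1)))

-- ===== PRECONDITION & SPEC =====
-- Pre_ excludes exactly the inputs on which A raises IndexError (and returns nothing):
-- the empty list (sequences[0]) and lists where some row is shorter than the first row.
def Pre_remove_columns_with_missing_data (sequences : List String) : Prop :=
  sequences ≠ [] ∧ ∀ s ∈ sequences, (sequences.headD "").toList.length ≤ s.toList.length
instance (sequences : List String) : Decidable (Pre_remove_columns_with_missing_data sequences) := by
  unfold Pre_remove_columns_with_missing_data; infer_instance

def pvWitness_remove_columns_with_missing_data : List String := ["A-N", "-NN", "GCN"]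

def Spec_remove_columns_with_missing_data (sequences : List String) (out : List String) : Prop := out = remove_columns_with_missing_data_alt sequences
instance (sequences : List String) (out : List String) : Decidable (Spec_remove_columns_with_missing_data sequences out) := by unfold Spec_remove_columns_with_missing_data; infer_instance

-- ===== CLAIM (what is proved, stated in full; the proofs are below) =====
def Claim_equal_remove_columns_with_missing_data : Prop := ∀ (sequences : List String), Dom_remove_columns_with_missing_data sequences → Pre_remove_columns_with_missing_data sequences → Spec_remove_columns_with_missing_data sequences (remove_columns_with_missing_data sequences)

-- ===== LEMMAS AND PROOFS =====

-- zip of a list (long enough) against a range-map, as a range-map of pairs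
lemma zip_left_range_map {α : Type} (l : List α) (d : α) (n : Nat) (g : Nat → Bool)
    (h : n ≤ l.length) :
    l.zip ((List.range n).map g) = (List.range n).map (fun i => (l.getD i d, g i)) := by
  apply List.ext_getElem
  · simp [Nat.min_eq_right h]
  · intro i h1 h2
    have hi : i < n := by simpa using h2
    have hil : i < l.length := lt_of_lt_of_le hi h
    simp [List.getElem_zip, List.getD_eq_getElem?_getD, List.getElem?_eq_getElem hil]

lemma zip_range_map_left {α : Type} (l : List α) (d : α) (n : Nat) (g : Nat → Bool)
    (h : n ≤ l.length) :
    ((List.range n).map g).zip l = (List.range n).map (fun i => (g i, l.getD i d)) := by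
  apply List.ext_getElem
  · simp [Nat.min_eq_left h]
  · intro i h1 h2
    have hi : i < n := by simpa using h2
    have hil : i < l.length := lt_of_lt_of_le hi h
    simp [List.getElem_zip, List.getD_eq_getElem?_getD, List.getElem?_eq_getElem hil]

-- the fold that builds the mask, characterised pointwise
lemma keep_fold_eq (n : Nat) (L : List String) (f : Nat → Bool)
    (h : ∀ s ∈ L, n ≤ s.toList.length) :
    L.foldl (fun k s => (k.zip s.toList).map (fun p => p.1 || (p.2 != '-' && p.2 != 'N')))
        ((List.range n).map f)
    = (List.range n).map
        (fun i => f i || L.any (fun s => !((s.toList.getD i ' ') == '-' || (s.toList.getD i ' ') == 'N'))) := by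
  induction L generalizing f with
  | nil => simp
  | cons s L ih =>
    simp only [List.foldl_cons]
    rw [zip_range_map_left s.toList ' ' n f (h s (by simp)), List.map_map]
    have hstep :
        ((fun p : Bool × Char => p.1 || (p.2 != '-' && p.2 != 'N')) ∘
          fun i => (f i, s.toList.getD i ' '))
        = fun i => f i || !((s.toList.getD i ' ') == '-' || (s.toList.getD i ' ') == 'N') := by
      funext i
      simp [Function.comp, Bool.not_or, bne]
    rw [hstep, ih _ (fun s' hs' => h s' (by simp [hs']))]
    apply List.map_congr_left
    intro i _
    cases hb : (f i) <;> simp [List.any_cons]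

-- compressing a (long enough) list against a range-map mask = picking the indices
lemma compress_eq {α : Type} (l : List α) (d : α) (n : Nat) (g : Nat → Bool)
    (h : n ≤ l.length) :
    ((l.zip ((List.range n).map g)).filter (fun p => p.2)).map (fun p => p.1)
    = ((List.range n).filter g).map (fun i => l.getD i d) := by
  rw [zip_left_range_map l d n g h, List.filter_map, List.map_map]
  have : ((fun p : α × Bool => p.2) ∘ fun i => (l.getD i d, g i)) = g := by
    funext i; simp [Function.comp]
  rw [this]
  rfl

theorem remove_cols_eq (sequences : List String)
    (hpre : Pre_remove_columns_with_missing_data sequences) :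
    remove_columns_with_missing_data sequences = remove_columns_with_missing_data_alt sequences := by
  obtain ⟨hne, hlen⟩ := hpre
  match sequences with
  | [] => exact absurd rfl hne
  | s0 :: rest =>
    unfold remove_columns_with_missing_data remove_columns_with_missing_data_alt
    simp only
    set n := s0.toList.length with hn
    have hlen' : ∀ s ∈ s0 :: rest, n ≤ s.toList.length := by
      intro s hs; simpa [hn] using hlen s hs
    have h0 : (List.replicate n false) = (List.range n).map (fun _ => false) := by
      simp [List.map_const']
    rw [h0, keep_fold_eq n (s0 :: rest) (fun _ => false) hlen']
    apply List.map_congr_left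
    intro s hs
    congr 1
    rw [compress_eq s.toList ' ' n _ (hlen' s hs)]
    simp

-- ===== VERDICT (by name: the statement is the Claim_ definition above) =====
theorem remove_columns_with_missing_data_spec : Claim_equal_remove_columns_with_missing_data := by
  intro sequences _ hpre
  exact remove_cols_eq sequences hpre
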